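-- pv_equiv track=rewrite | github.com/Malek04/TP-Python | TP3 - Listes, chaînes, tuples, dictionnaires/Exercice7.py | LongMin
-- ===== SOURCE A (Python) =====
-- def LongMin(chaine):
--     max_len = 0
--     current_len = 0
--     for char in chaine:
--         if char.islower():
--             current_len += 1
--             max_len = max(max_len, current_len)
--         else:
--             current_len = 0
--     return max_len
-- ===== SOURCE B (Python) =====
-- def LongMin(chaine):
--     # boundary-gap algorithm: collect indices of non-lowercase characters with
--     # sentinels -1 and len(chaine); the answer is the largest gap between
--     # consecutive boundaries.
--     bounds = [-1] + [i for i, c in enumerate(chaine) if not c.islower()] + [len(chaine)]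
--     return max(b - a - 1 for a, b in zip(bounds, bounds[1:]))
-- ===== Notes on version B (the rewrite author's own statement) =====
-- stated objective: alternative
-- what changed: Replaces A's running-counter/running-max scan by a boundary-gap algorithm: build the list of indices of non-lowercase characters with sentinels -1 and len(chaine), then return the maximum gap (b-a-1) between consecutive boundaries.
import Mathlib
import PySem

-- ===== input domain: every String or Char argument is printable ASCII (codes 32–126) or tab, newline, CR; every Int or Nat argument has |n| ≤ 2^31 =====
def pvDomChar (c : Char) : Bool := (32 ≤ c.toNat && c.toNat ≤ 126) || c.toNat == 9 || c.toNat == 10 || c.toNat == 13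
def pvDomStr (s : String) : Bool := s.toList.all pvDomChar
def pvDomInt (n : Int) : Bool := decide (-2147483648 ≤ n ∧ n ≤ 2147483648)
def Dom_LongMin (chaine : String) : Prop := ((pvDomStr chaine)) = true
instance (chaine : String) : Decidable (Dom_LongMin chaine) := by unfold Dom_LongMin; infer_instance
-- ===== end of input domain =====

-- B replaces A's running-counter scan by a boundary-gap algorithm (indices of
-- non-lowercase characters with sentinels, then max gap); same cost, different structure.

-- ===== PORT A =====
-- one loop step of A: update (max_len, current_len) for one character
def pvStepA (s : Int × Int) (c : Char) : Int × Int :=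
  if PySem.Chars.islower c then (max s.1 (s.2 + 1), s.2 + 1) else (s.1, 0)

def LongMin (chaine : String) : Int :=
  (chaine.toList.foldl pvStepA ((0 : Int), (0 : Int))).1

-- ===== PORT B =====
-- the comprehension [i for i, c in enumerate(chaine) if not c.islower()],
-- transliterated with an explicit index counter
def pvBounds : List Char → Int → List Int
  | [], _ => []
  | c :: cs, i =>
    if PySem.Chars.islower c then pvBounds cs (i + 1) else i :: pvBounds cs (i + 1)

def LongMin_alt (chaine : String) : Int :=
  let cs := chaine.toList
  let bounds := (-1 : Int) :: pvBounds cs 0 ++ [(cs.length : Int)]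
  -- max(b - a - 1 for a, b in zip(bounds, bounds[1:])): bounds always has ≥ 2
  -- elements, so the generator is nonempty and Python's max never raises
  match (bounds.zip (bounds.drop 1)).map (fun p => p.2 - p.1 - 1) with
  | g :: gs => gs.foldl max g
  | [] => 0

-- ===== PRECONDITION & SPEC =====
def Spec_LongMin (chaine : String) (out : Int) : Prop := out = LongMin_alt chaine
instance (chaine : String) (out : Int) : Decidable (Spec_LongMin chaine out) := by unfold Spec_LongMin; infer_instance

-- ===== CLAIM (what is proved, stated in full; the proofs are below) =====
def Claim_equal_LongMin : Prop := ∀ (chaine : String), Dom_LongMin chaine → Spec_LongMin chaine (LongMin chaine)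

-- ===== LEMMAS AND PROOFS =====

-- abstraction of A's loop: max run length, given current run already has length k
def pvF : List Char → Nat → Nat
  | [], _ => 0
  | c :: cs, k =>
    if PySem.Chars.islower c then max (k + 1) (pvF cs (k + 1)) else pvF cs 0

-- A's fold computes max m (pvF cs k) from state (m, k)
theorem pvFoldA_eq (cs : List Char) : ∀ (m k : Nat),
    (cs.foldl pvStepA ((m : Int), (k : Int))).1 = ((max m (pvF cs k) : Nat) : Int) := by
  induction cs with
  | nil => intro m k; simp [pvF]
  | cons c cs ih =>
    intro m k
    by_cases h : PySem.Chars.islower c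
    · have hst : pvStepA ((m : Int), (k : Int)) c = (((max m (k + 1) : Nat) : Int), ((k + 1 : Nat) : Int)) := by
        simp [pvStepA, h]
      rw [List.foldl_cons, hst, ih]
      simp only [pvF, h, if_pos]
      rw [Nat.max_assoc]
    · have hst : pvStepA ((m : Int), (k : Int)) c = ((m : Int), ((0 : Nat) : Int)) := by
        simp [pvStepA, h]
      rw [List.foldl_cons, hst, ih]
      simp [pvF, h]

-- max gap between consecutive elements of prev :: l ++ [last]
def pvGmax : Int → List Int → Int → Int
  | prev, [], last => last - prev - 1
  | prev, b :: bs, last => max (b - prev - 1) (pvGmax b bs last)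

theorem pvGapsFold (l : List Int) : ∀ (prev last a : Int),
    (((prev :: l ++ [last]).zip ((prev :: l ++ [last]).drop 1)).map
        (fun p => p.2 - p.1 - 1)).foldl max a = max a (pvGmax prev l last) := by
  induction l with
  | nil => intro prev last a; simp [pvGmax]
  | cons b bs ih =>
    intro prev last a
    simp only [List.cons_append, List.zip_cons_cons, List.drop_succ_cons, List.drop_zero,
      List.map_cons, List.foldl_cons, pvGmax]
    have ih' := ih b last (max a (b - prev - 1))
    simp only [List.cons_append, List.drop_succ_cons, List.drop_zero] at ih'
    rw [ih', Int.max_assoc]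

-- B's head-init fold equals pvGmax
theorem pvAltFold (l : List Int) (prev last : Int) :
    (match (((prev :: l ++ [last]).zip ((prev :: l ++ [last]).drop 1)).map
        (fun p => p.2 - p.1 - 1)) with
      | g :: gs => gs.foldl max g
      | [] => (0 : Int)) = pvGmax prev l last := by
  cases l with
  | nil => simp [pvGmax]
  | cons b bs =>
    simp only [List.cons_append, List.zip_cons_cons, List.drop_succ_cons, List.drop_zero,
      List.map_cons, pvGmax]
    have hg := pvGapsFold bs b last (b - prev - 1)
    simp only [List.cons_append, List.drop_succ_cons, List.drop_zero] at hg
    rw [hg]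

-- the bridge: max gap over boundaries from position i with current run length k
theorem pvMain (cs : List Char) : ∀ (i : Int) (k : Nat),
    pvGmax (i - 1 - k) (pvBounds cs i) (i + cs.length) = ((max k (pvF cs k) : Nat) : Int) := by
  induction cs with
  | nil => intro i k; simp [pvBounds, pvGmax, pvF]; omega
  | cons c cs ih =>
    intro i k
    by_cases h : PySem.Chars.islower c
    · have harg : i - 1 - (k : Int) = (i + 1) - 1 - ((k + 1 : Nat) : Int) := by push_cast; ring
      rw [pvBounds, if_pos h, harg]
      rw [show i + ((c :: cs).length : Int) = (i + 1) + (cs.length : Int) by push_cast [List.length_cons]; ring]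
      rw [ih (i + 1) (k + 1)]
      simp only [pvF, h, if_pos]
      congr 1
      omega
    · have hih := ih (i + 1) 0
      rw [show (i + 1) - 1 - ((0 : Nat) : Int) = i by push_cast; ring] at hih
      rw [pvBounds, if_neg h, pvGmax]
      rw [show i - (i - 1 - (k : Int)) - 1 = (k : Int) by ring]
      rw [show i + ((c :: cs).length : Int) = (i + 1) + (cs.length : Int) by push_cast [List.length_cons]; ring]
      rw [hih]
      simp only [pvF, h, if_neg, Bool.false_eq_true, not_false_iff]
      push_cast [Int.max_def, Nat.max_def]
      split_ifs <;> omega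

-- ===== VERDICT (by name: the statement is the Claim_ definition above) =====
theorem LongMin_spec : Claim_equal_LongMin := by
  intro chaine _
  unfold Spec_LongMin LongMin LongMin_alt
  have hA := pvFoldA_eq chaine.toList 0 0
  norm_num at hA
  have h := pvMain chaine.toList 0 0
  norm_num at h
  rw [hA, pvAltFold (pvBounds chaine.toList 0) (-1) (chaine.toList.length : Int)]
  simpa using h.symm
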